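-- pv_equiv track=rewrite | github.com/yugotakada/FWO-color-code | src/FWO_color_code_488_cond_error.py | extract_specific_indices_len4_elements
-- ===== SOURCE A (Python) =====
-- def extract_specific_indices_len4_elements(input_list):
--     output = []
--     for i in range(0, len(input_list), 4):
--         chunk = input_list[i:i + 4]
--         if len(chunk) == 4:
--             extracted_elements = [chunk[1], chunk[2]]
--             output.extend(extracted_elements)
--
--     return output
-- ===== SOURCE B (Python) =====
-- def extract_specific_indices_len4_elements(input_list):
--     m = (len(input_list) // 4) * 4  # index past the last complete 4-chunk
--     seconds = input_list[1:m:4]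
--     thirds = input_list[2:m:4]
--     return [x for pair in zip(seconds, thirds) for x in pair]
-- ===== Notes on version B (the rewrite author's own statement) =====
-- stated objective: alternative
-- what changed: Replaces the explicit chunk loop (slice each 4-chunk, test its length, extend) by two stride-4 slices truncated at the last complete chunk, interleaved with zip.
import Mathlib
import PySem

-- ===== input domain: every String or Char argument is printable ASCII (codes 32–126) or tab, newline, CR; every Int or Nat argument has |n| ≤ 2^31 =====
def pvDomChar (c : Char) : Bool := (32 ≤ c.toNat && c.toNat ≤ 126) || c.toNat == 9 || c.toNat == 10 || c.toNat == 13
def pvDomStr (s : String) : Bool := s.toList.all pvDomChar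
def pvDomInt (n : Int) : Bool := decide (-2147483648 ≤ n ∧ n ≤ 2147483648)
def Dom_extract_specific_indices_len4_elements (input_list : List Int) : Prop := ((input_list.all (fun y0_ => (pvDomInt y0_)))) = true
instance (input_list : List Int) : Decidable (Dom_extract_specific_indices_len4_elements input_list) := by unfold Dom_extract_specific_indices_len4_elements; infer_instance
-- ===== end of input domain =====

-- B replaces A's explicit chunk loop by two stride-4 slices (the 2nd and 3rd element of each
-- complete chunk) interleaved via zip — a different decomposition of the same extraction (objective: alternative).


-- ===== PORT A =====
def extract_specific_indices_len4_elements (input_list : List Int) : List Int :=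
  (PySem.List.pyRange 0 (input_list.length : Int) 4).foldl
    (fun output i =>
      let chunk := PySem.List.slice input_list (some i) (some (i + 4))
      if chunk.length == 4 then
        -- guard ensures len(chunk) = 4, so indices 1 and 2 are in range; the default 0 is never used
        output ++ [PySem.List.pyGetD chunk 1 0, PySem.List.pyGetD chunk 2 0]
      else output)
    []

-- ===== PORT B =====
def extract_specific_indices_len4_elements_alt (input_list : List Int) : List Int :=
  let m : Int := PySem.Int.floordiv (input_list.length : Int) 4 * 4
  -- step 4 ≠ 0, so slice? always returns some; the .getD [] fallback is never taken
  let seconds := (PySem.List.slice? input_list (some 1) (some m) 4).getD []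
  let thirds := (PySem.List.slice? input_list (some 2) (some m) 4).getD []
  (seconds.zip thirds).flatMap (fun p => [p.1, p.2])

-- ===== PRECONDITION & SPEC =====
def Spec_extract_specific_indices_len4_elements (input_list : List Int) (out : List Int) : Prop := out = extract_specific_indices_len4_elements_alt input_list
instance (input_list : List Int) (out : List Int) : Decidable (Spec_extract_specific_indices_len4_elements input_list out) := by unfold Spec_extract_specific_indices_len4_elements; infer_instance

-- ===== CLAIM (what is proved, stated in full; the proofs are below) =====
def Claim_equal_extract_specific_indices_len4_elements : Prop := ∀ (input_list : List Int), Dom_extract_specific_indices_len4_elements input_list → Spec_extract_specific_indices_len4_elements input_list (extract_specific_indices_len4_elements input_list)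

-- ===== LEMMAS AND PROOFS =====

-- common closed form: one pair (xs[4k+1], xs[4k+2]) per complete chunk k < len/4
def pvF (xs : List Int) : List Int :=
  (List.range (xs.length / 4)).flatMap (fun k => [xs.getD (4 * k + 1) 0, xs.getD (4 * k + 2) 0])

theorem pv_filter_range {q cnt : Nat} (f : Nat → List Int) (h : q ≤ cnt) :
    (List.range cnt).flatMap (fun k => if k < q then f k else []) =
      (List.range q).flatMap f := by
  obtain ⟨d, rfl⟩ := Nat.exists_eq_add_of_le h
  rw [List.range_add, List.flatMap_append]
  have h2 : (List.map (fun x => q + x) (List.range d)).flatMap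
      (fun k => if k < q then f k else []) = [] := by
    rw [List.flatMap_eq_nil_iff]
    intro x hx
    simp only [List.mem_map] at hx
    obtain ⟨j, -, rfl⟩ := hx
    simp
  rw [h2, List.append_nil]
  apply List.flatMap_congr
  intro k hk
  rw [if_pos (List.mem_range.mp hk)]

theorem pvA_eq (xs : List Int) : extract_specific_indices_len4_elements xs = pvF xs := by
  unfold extract_specific_indices_len4_elements pvF
  rw [PySem.List.pyRange_of_pos 0 (xs.length : Int) (by norm_num), List.foldl_map]
  have hstep : (fun (output : List Int) (k : Nat) =>
      let chunk := PySem.List.slice xs (some (0 + 4 * (k : Int))) (some (0 + 4 * (k : Int) + 4))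
      if chunk.length == 4 then
        output ++ [PySem.List.pyGetD chunk 1 0, PySem.List.pyGetD chunk 2 0]
      else output)
      = fun output k =>
        output ++ (if k < xs.length / 4 then [xs.getD (4 * k + 1) 0, xs.getD (4 * k + 2) 0] else []) := by
    funext output k
    have hc : (0 + 4 * (k : Int)) = ((4 * k : Nat) : Int) := by push_cast; ring
    have hc2 : (0 + 4 * (k : Int) + 4) = ((4 * k + 4 : Nat) : Int) := by push_cast; ring
    rw [hc2, hc, PySem.List.slice_natCast]
    have hlen : ((xs.drop (4 * k)).take (4 * k + 4 - 4 * k)).length = min (4 * k + 4 - 4 * k) (xs.length - 4 * k) := by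
      simp [List.length_take]
    by_cases hk : k < xs.length / 4
    · have h4 : ((xs.drop (4 * k)).take (4 * k + 4 - 4 * k)).length == 4 := by
        simp only [hlen]; simp; omega
      rw [if_pos h4, if_pos hk]
      congr 1
      have e1 : PySem.List.pyGetD ((xs.drop (4 * k)).take (4 * k + 4 - 4 * k)) 1 0 = xs.getD (4 * k + 1) 0 := by
        rw [show (1 : Int) = ((1 : Nat) : Int) from rfl, PySem.List.pyGetD_natCast]
        rw [List.getD_eq_getElem?_getD, List.getD_eq_getElem?_getD, List.getElem?_take,
          if_pos (by omega), List.getElem?_drop]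
      have e2 : PySem.List.pyGetD ((xs.drop (4 * k)).take (4 * k + 4 - 4 * k)) 2 0 = xs.getD (4 * k + 2) 0 := by
        rw [show (2 : Int) = ((2 : Nat) : Int) from rfl, PySem.List.pyGetD_natCast]
        rw [List.getD_eq_getElem?_getD, List.getD_eq_getElem?_getD, List.getElem?_take,
          if_pos (by omega), List.getElem?_drop]
      rw [e1, e2]
    · have h4 : ¬ (((xs.drop (4 * k)).take (4 * k + 4 - 4 * k)).length == 4) := by
        simp only [hlen]; simp; omega
      rw [if_neg (by simpa using h4), if_neg hk, List.append_nil]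
  rw [hstep, PySem.List.foldl_append_eq_flatMap, List.nil_append]
  apply pv_filter_range
  split_ifs <;> omega

theorem pv_filterMap_map (f : Nat → Option Int) (g : Nat → Int) (l : List Nat)
    (h : ∀ x ∈ l, f x = some (g x)) : l.filterMap f = l.map g := by
  induction l with
  | nil => rfl
  | cons a t ih =>
    simp only [List.filterMap_cons, h a (List.mem_cons_self), List.map_cons]
    rw [ih (fun x hx => h x (List.mem_cons_of_mem a hx))]

theorem pv_slice_stride (xs : List Int) (o : Nat) (ho : o = 1 ∨ o = 2) :
    PySem.List.slice? xs (some (o : Int)) (some ((4 * (xs.length / 4) : Nat) : Int)) 4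
      = some ((List.range (xs.length / 4)).map (fun k => xs.getD (4 * k + o) 0)) := by
  have h1 : ¬((o : Int) < 0) := by omega
  have h2 : ¬(((4 * (xs.length / 4) : Nat) : Int) < 0) := by omega
  have h3 : min (((4 * (xs.length / 4) : Nat)) : Int) (xs.length : Int)
      = ((4 * (xs.length / 4) : Nat) : Int) := by
    have : 4 * (xs.length / 4) ≤ xs.length := by omega
    omega
  simp only [PySem.List.slice?, PySem.List.sliceIndices, if_neg h1, if_neg h2]
  norm_num
  split_ifs with h
  · have hK : ((min (4 * ((xs.length : Int) / 4)) ↑xs.length - min ↑o ↑xs.length + 4 - 1) / 4).toNat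
        = xs.length / 4 := by omega
    rw [hK]
    apply pv_filterMap_map
    intro x hx
    have hxq : x < xs.length / 4 := List.mem_range.mp hx
    have hon : o < xs.length := h.2
    have hidx : (min (o : Int) ↑xs.length + 4 * (x : Int)).toNat = 4 * x + o := by omega
    rw [hidx]
    have hlt2 : 4 * x + o < xs.length := by omega
    rw [List.getElem?_eq_getElem hlt2]
    simp
  · have hq0 : xs.length / 4 = 0 := by omega
    simp [hq0]

theorem pvB_eq (xs : List Int) : extract_specific_indices_len4_elements_alt xs = pvF xs := by
  unfold extract_specific_indices_len4_elements_alt pvF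
  have hm : PySem.Int.floordiv (xs.length : Int) 4 * 4 = ((4 * (xs.length / 4) : Nat) : Int) := by
    rw [show ((4:Int)) = ((4:Nat):Int) from rfl, PySem.Int.floordiv_natCast]; push_cast; ring
  have h1 : PySem.List.slice? xs (some 1) (some ((4 * (xs.length / 4) : Nat) : Int)) 4
      = some ((List.range (xs.length / 4)).map (fun k => xs.getD (4 * k + 1) 0)) := by
    simpa using pv_slice_stride xs 1 (Or.inl rfl)
  have h2 : PySem.List.slice? xs (some 2) (some ((4 * (xs.length / 4) : Nat) : Int)) 4
      = some ((List.range (xs.length / 4)).map (fun k => xs.getD (4 * k + 2) 0)) := by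
    simpa using pv_slice_stride xs 2 (Or.inr rfl)
  simp only [hm, h1, h2, Option.getD_some, List.zip_map']
  simp [List.flatMap_map]

-- ===== VERDICT (by name: the statement is the Claim_ definition above) =====
theorem extract_specific_indices_len4_elements_spec : Claim_equal_extract_specific_indices_len4_elements := by
  intro xs _
  unfold Spec_extract_specific_indices_len4_elements
  rw [pvA_eq, pvB_eq]
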